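-- pv_equiv track=rewrite | github.com/RawdaYassin/Image-Processing | valley_threshold_segmentation.py | find_valley_point
-- ===== SOURCE A (Python) =====
-- def find_valley_point(histogram, peak1, peak2):
--     deltas = [[float('inf'), -1]
--               for _ in range(5)]  # Array to store smallest delta values
--     if peak1 < peak2:
--         for i in range(peak1 + 1, peak2):
--             delta_hist = histogram[i]
--             insert_into_deltas(deltas, delta_hist, i)
--     else:
--         for i in range(peak2 + 1, peak1):
--             delta_hist = histogram[i]
--             insert_into_deltas(deltas, delta_hist, i)
--     return deltas[0][1]  # The location of the smallest delta
--
-- def insert_into_deltas(deltas, value, place):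
--     for i in range(len(deltas)):
--         if value < deltas[i][0]:
--             deltas.insert(i, [value, place])
--             deltas.pop()  # Remove the last element to maintain array size
--             break
-- ===== SOURCE B (Python) =====
-- def find_valley_point(histogram, peak1, peak2):
--     lo, hi = (peak1, peak2) if peak1 < peak2 else (peak2, peak1)
--     best_val = None
--     best_idx = -1
--     for i in range(lo + 1, hi):
--         v = histogram[i]
--         if best_val is None or v < best_val:
--             best_val, best_idx = v, i
--     return best_idx
-- ===== Notes on version B (the rewrite author's own statement) =====
-- stated objective: simpler
-- what changed: Replaced the fixed-size top-5 deltas buffer with its insert/pop helper by a single scalar scan keeping only the current minimum value and its first index.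
import Mathlib
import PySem

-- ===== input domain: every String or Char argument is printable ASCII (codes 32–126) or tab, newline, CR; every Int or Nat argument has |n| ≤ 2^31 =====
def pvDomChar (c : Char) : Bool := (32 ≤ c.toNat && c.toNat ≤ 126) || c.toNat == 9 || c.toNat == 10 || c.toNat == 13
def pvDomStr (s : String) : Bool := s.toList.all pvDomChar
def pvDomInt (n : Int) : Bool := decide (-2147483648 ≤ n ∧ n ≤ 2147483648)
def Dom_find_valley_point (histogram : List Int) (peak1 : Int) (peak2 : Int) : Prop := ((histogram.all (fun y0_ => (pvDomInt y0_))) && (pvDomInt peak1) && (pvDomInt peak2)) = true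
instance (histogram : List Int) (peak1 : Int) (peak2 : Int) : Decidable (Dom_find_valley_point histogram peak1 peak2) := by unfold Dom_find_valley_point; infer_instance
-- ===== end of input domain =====

-- B replaces A's fixed-size top-5 `deltas` buffer and its insert/pop helper by a single
-- scalar scan keeping only the current minimum and its first index (objective: simpler).

-- ===== PORT A =====
-- float('inf') is only ever a sentinel compared against ints; it is ported exactly as
-- `none : Option Int`, with `pvLtSent v none = true` (any int < inf).
def pvLtSent (v : Int) (x : Option Int) : Bool :=
  match x with
  | none => true
  | some w => decide (v < w)

-- literal port of insert_into_deltas: scan for the first slot whose value exceeds v,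
-- insert there and pop the last element; recursion over the list is the loop over i.
def insertIntoDeltas : List (Option Int × Int) → Int → Int → List (Option Int × Int)
  | [], _, _ => []
  | d :: ds, v, p =>
      if pvLtSent v d.1 then (some v, p) :: (d :: ds).dropLast
      else d :: insertIntoDeltas ds v p

def find_valley_point (histogram : List Int) (peak1 : Int) (peak2 : Int) : Int :=
  let deltas0 : List (Option Int × Int) := List.replicate 5 (none, -1)
  -- histogram[i]: Pre_ excludes the IndexError case (pyGet? = none); getD 0 is never used inside Pre_
  let step := fun (ds : List (Option Int × Int)) (i : Int) =>
    insertIntoDeltas ds ((PySem.List.pyGet? histogram i).getD 0) i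
  if peak1 < peak2 then
    (((PySem.List.pyRange (peak1 + 1) peak2 1).foldl step deltas0).headD (none, -1)).2
  else
    (((PySem.List.pyRange (peak2 + 1) peak1 1).foldl step deltas0).headD (none, -1)).2

-- ===== PORT B =====
-- state = (best_val : Option Int, best_idx : Int), exactly Source B's pair of variables
def scanStep (histogram : List Int) (best : Option Int × Int) (i : Int) : Option Int × Int :=
  let v := (PySem.List.pyGet? histogram i).getD 0
  match best.1 with
  | none => (some v, i)
  | some bv => if v < bv then (some v, i) else best

def find_valley_point_alt (histogram : List Int) (peak1 : Int) (peak2 : Int) : Int :=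
  let lo := if peak1 < peak2 then peak1 else peak2
  let hi := if peak1 < peak2 then peak2 else peak1
  ((PySem.List.pyRange (lo + 1) hi 1).foldl (scanStep histogram) ((none : Option Int), (-1 : Int))).2

-- ===== PRECONDITION & SPEC =====
-- Pre_ excludes exactly the inputs on which Python raises IndexError: some index of the
-- scanned open interval is outside [-len, len).
def Pre_find_valley_point (histogram : List Int) (peak1 : Int) (peak2 : Int) : Prop :=
  let n : Int := histogram.length
  let lo := min peak1 peak2
  let hi := max peak1 peak2
  hi ≤ lo + 1 ∨ (-n ≤ lo + 1 ∧ hi ≤ n)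
instance (histogram : List Int) (peak1 : Int) (peak2 : Int) : Decidable (Pre_find_valley_point histogram peak1 peak2) := by unfold Pre_find_valley_point; infer_instance

def pvWitness_find_valley_point : List Int × Int × Int := ([3, 1, 2], 0, 2)

def Spec_find_valley_point (histogram : List Int) (peak1 : Int) (peak2 : Int) (out : Int) : Prop := out = find_valley_point_alt histogram peak1 peak2
instance (histogram : List Int) (peak1 : Int) (peak2 : Int) (out : Int) : Decidable (Spec_find_valley_point histogram peak1 peak2 out) := by unfold Spec_find_valley_point; infer_instance

-- ===== CLAIM (what is proved, stated in full; the proofs are below) =====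
def Claim_equal_find_valley_point : Prop := ∀ (histogram : List Int) (peak1 : Int) (peak2 : Int), Dom_find_valley_point histogram peak1 peak2 → Pre_find_valley_point histogram peak1 peak2 → Spec_find_valley_point histogram peak1 peak2 (find_valley_point histogram peak1 peak2)

-- ===== LEMMAS AND PROOFS =====

-- Invariant: after folding any index list, the head of A's deltas buffer equals B's scalar state.
theorem foldl_deltas_head (histogram : List Int) :
    ∀ (l : List Int) (d : Option Int × Int) (ds : List (Option Int × Int)),
      ((l.foldl (fun s i => insertIntoDeltas s ((PySem.List.pyGet? histogram i).getD 0) i)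
          (d :: ds)).headD (none, -1)) = l.foldl (scanStep histogram) d := by
  intro l
  induction l with
  | nil => intro d ds; simp
  | cons i l ih =>
      intro d ds
      simp only [List.foldl_cons]
      by_cases h : pvLtSent ((PySem.List.pyGet? histogram i).getD 0) d.1 = true
      · have hA : insertIntoDeltas (d :: ds) ((PySem.List.pyGet? histogram i).getD 0) i
            = (some ((PySem.List.pyGet? histogram i).getD 0), i) :: (d :: ds).dropLast := by
          simp [insertIntoDeltas, h]
        have hB : scanStep histogram d i
            = (some ((PySem.List.pyGet? histogram i).getD 0), i) := by
          rcases hd : d.1 with _ | bv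
          · simp [scanStep, hd]
          · have hlt : (PySem.List.pyGet? histogram i).getD 0 < bv := by
              simp [pvLtSent, hd] at h; exact h
            simp [scanStep, hd, hlt]
        rw [hA, hB, ih]
      · have hA : insertIntoDeltas (d :: ds) ((PySem.List.pyGet? histogram i).getD 0) i
            = d :: insertIntoDeltas ds ((PySem.List.pyGet? histogram i).getD 0) i := by
          simp [insertIntoDeltas, h]
        have hB : scanStep histogram d i = d := by
          rcases hd : d.1 with _ | bv
          · exfalso; simp [pvLtSent, hd] at h
          · have hge : ¬ ((PySem.List.pyGet? histogram i).getD 0 < bv) := by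
              simp [pvLtSent, hd] at h; omega
            simp [scanStep, hd, hge]
        rw [hA, hB, ih]

-- ===== VERDICT (by name: the statement is the Claim_ definition above) =====
theorem find_valley_point_spec : Claim_equal_find_valley_point := by
  intro histogram peak1 peak2 _ _
  unfold Spec_find_valley_point find_valley_point find_valley_point_alt
  have hrep : List.replicate 5 ((none : Option Int), (-1 : Int))
      = ((none : Option Int), (-1 : Int)) :: List.replicate 4 ((none : Option Int), (-1 : Int)) := rfl
  by_cases h : peak1 < peak2
  · simp only [if_pos h, hrep]
    rw [foldl_deltas_head]
  · simp only [if_neg h, hrep]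
    rw [foldl_deltas_head]
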